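-- pv_equiv track=rewrite | github.com/OrianeLanfranchi/Repo-IA02 | Grid.py | size_to_2d_array
-- ===== SOURCE A (Python) =====
-- from typing import Callable, List, Tuple, Union
--
-- Grid = List[List[int]]
--
-- def size_to_2d_array(size) -> Grid:
--     """Create grid of given size."""
--     if size <= 0:
--         return None
--     liste = []
--     for i in range(size * 2 + 1):
--         row = []
--         for j in range(size * 2 + 1):
--             if i + j < size:
--                 row.append(None)
--             elif i + j > 3 * size:
--                 row.append(None)
--             else:
--                 row.append(0)
--         liste.append(row)
--     return liste
-- ===== SOURCE B (Python) =====
-- def size_to_2d_array(size):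
--     """Create grid of given size."""
--     if size <= 0:
--         return None
--     w = size * 2 + 1
--     return [[None] * max(size - i, 0)
--             + [0] * (w - max(size - i, 0) - max(i - size, 0))
--             + [None] * max(i - size, 0)
--             for i in range(w)]
-- ===== Notes on version B (the rewrite author's own statement) =====
-- stated objective: faster
-- what changed: Replaces the nested per-cell loop testing i+j against the band bounds by a per-row closed form: the counts of leading/trailing None cells are computed arithmetically (max(size-i,0), max(i-size,0)) and each row is built with list repetition, removing the inner loop's per-cell branching.
import Mathlib
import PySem

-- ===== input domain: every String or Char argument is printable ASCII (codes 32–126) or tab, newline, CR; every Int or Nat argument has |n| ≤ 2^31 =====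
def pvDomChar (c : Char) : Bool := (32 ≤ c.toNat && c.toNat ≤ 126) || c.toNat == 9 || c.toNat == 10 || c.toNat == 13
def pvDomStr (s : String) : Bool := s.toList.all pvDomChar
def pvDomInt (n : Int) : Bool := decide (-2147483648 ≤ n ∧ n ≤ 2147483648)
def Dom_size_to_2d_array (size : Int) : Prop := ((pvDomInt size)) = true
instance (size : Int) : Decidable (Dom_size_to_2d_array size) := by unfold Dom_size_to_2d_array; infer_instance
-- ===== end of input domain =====

-- B replaces A's per-cell band test by a per-row closed form (counts of leading/trailing
-- None cells computed arithmetically, rows built by replication): objective 'alternative'.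

-- ===== PORT A =====
def size_to_2d_array (size : Int) : Option (List (List (Option Int))) :=
  if size ≤ 0 then none
  else
    some ((PySem.List.pyRange 0 (size * 2 + 1) 1).foldl (fun liste i =>
      liste ++ [(PySem.List.pyRange 0 (size * 2 + 1) 1).foldl (fun row j =>
        row ++ [if i + j < size then none
                else if i + j > 3 * size then none
                else some (0 : Int)]) []]) [])

-- ===== PORT B =====
def size_to_2d_array_alt (size : Int) : Option (List (List (Option Int))) :=
  if size ≤ 0 then none
  else
    some ((PySem.List.pyRange 0 (size * 2 + 1) 1).map (fun i =>
      List.replicate (max (size - i) 0).toNat (none : Option Int)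
      ++ List.replicate ((size * 2 + 1) - max (size - i) 0 - max (i - size) 0).toNat (some 0)
      ++ List.replicate (max (i - size) 0).toNat none))

-- ===== PRECONDITION & SPEC =====
def Spec_size_to_2d_array (size : Int) (out : Option (List (List (Option Int)))) : Prop := out = size_to_2d_array_alt size
instance (size : Int) (out : Option (List (List (Option Int)))) : Decidable (Spec_size_to_2d_array size out) := by unfold Spec_size_to_2d_array; infer_instance

-- ===== CLAIM (what is proved, stated in full; the proofs are below) =====
def Claim_equal_size_to_2d_array : Prop := ∀ (size : Int), Dom_size_to_2d_array size → Spec_size_to_2d_array size (size_to_2d_array size)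

-- ===== LEMMAS AND PROOFS =====

-- A's inner loop over j produces exactly B's three replicated blocks.
theorem pv_row_eq (size i : Int) (hs : 0 < size) (hi : 0 ≤ i) (hi2 : i < size * 2 + 1) :
    ((PySem.List.pyRange 0 (size * 2 + 1) 1).foldl (fun row j =>
        row ++ [if i + j < size then none
                else if i + j > 3 * size then none
                else some (0 : Int)]) [])
    = List.replicate (max (size - i) 0).toNat (none : Option Int)
      ++ List.replicate ((size * 2 + 1) - max (size - i) 0 - max (i - size) 0).toNat (some 0)
      ++ List.replicate (max (i - size) 0).toNat none := by
  rw [PySem.List.foldl_append_singleton_eq_map, List.nil_append, PySem.List.pyRange_one,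
    List.map_map]
  apply List.ext_getElem
  · simp only [List.length_map, List.length_range, List.length_append, List.length_replicate]
    omega
  · intro k h1 h2
    simp only [List.getElem_map, List.getElem_range, Function.comp]
    have hk : (k : Int) < size * 2 + 1 := by
      simp only [List.length_map, List.length_range] at h1; omega
    by_cases cA : (k : Int) < size - i
    · rw [List.getElem_append_left
        (by simp only [List.length_replicate, List.length_append]; omega)]
      rw [List.getElem_append_left (by simp only [List.length_replicate]; omega)]
      simp only [List.getElem_replicate]
      have h3 : i + (0 + (k : Int)) < size := by omega
      simp only [if_pos h3]
    · by_cases cB : (k : Int) ≤ 3 * size - i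
      · rw [List.getElem_append_left
          (by simp only [List.length_replicate, List.length_append]; omega)]
        rw [List.getElem_append_right (by simp only [List.length_replicate]; omega)]
        simp only [List.getElem_replicate, List.length_replicate]
        have h3 : ¬ i + (0 + (k : Int)) < size := by omega
        have h4 : ¬ i + (0 + (k : Int)) > 3 * size := by omega
        simp only [if_neg h3, if_neg h4]
      · rw [List.getElem_append_right
          (by simp only [List.length_replicate, List.length_append]; omega)]
        simp only [List.getElem_replicate, List.length_append, List.length_replicate]
        have h3 : ¬ i + (0 + (k : Int)) < size := by omega
        have h4 : i + (0 + (k : Int)) > 3 * size := by omega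
        simp only [if_neg h3, if_pos h4]

-- ===== VERDICT (by name: the statement is the Claim_ definition above) =====
theorem size_to_2d_array_spec : Claim_equal_size_to_2d_array := by
  intro size _
  unfold Spec_size_to_2d_array size_to_2d_array size_to_2d_array_alt
  by_cases hs : size ≤ 0
  · simp [hs]
  · simp only [hs, if_false, Option.some.injEq]
    rw [PySem.List.foldl_append_singleton_eq_map, List.nil_append]
    apply List.map_congr_left
    intro i hi
    rw [PySem.List.mem_pyRange_one] at hi
    exact pv_row_eq size i (by omega) hi.1 hi.2
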